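-- pv_equiv track=rewrite | github.com/vitalii-vorobiov/lab_one | task6.py | directors_max
-- ===== SOURCE A (Python) =====
-- def directors_max(dict_persons):
--     """
--     (dict) -> (list)
--     Return list of films with highest number of persons
--     """
--     max_persons = 0
--     out_lst = set()
--     for one_film_name in dict_persons:
--         if len(dict_persons[one_film_name]) >= max_persons:
--             max_persons = len(dict_persons[one_film_name])
--     for one_film_name in dict_persons:
--         if len(dict_persons[one_film_name]) == max_persons:
--             out_lst.add((one_film_name +':'+' '.join(dict_persons[one_film_name])))
--     return out_lst
-- ===== SOURCE B (Python) =====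
-- def directors_max(dict_persons):
--     """
--     (dict) -> (list)
--     Return list of films with highest number of persons
--     """
--     max_persons = 0
--     out_lst = set()
--     for film in dict_persons:
--         n = len(dict_persons[film])
--         if n > max_persons:
--             max_persons = n
--             out_lst = {film + ':' + ' '.join(dict_persons[film])}
--         elif n == max_persons:
--             out_lst.add(film + ':' + ' '.join(dict_persons[film]))
--     return out_lst
-- ===== Notes on version B (the rewrite author's own statement) =====
-- stated objective: alternative
-- what changed: One single pass that keeps the running maximum and the current winner set (resetting it on a strictly larger count) replaces A's two separate passes (find the max, then re-scan to collect the winners).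
import Mathlib
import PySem

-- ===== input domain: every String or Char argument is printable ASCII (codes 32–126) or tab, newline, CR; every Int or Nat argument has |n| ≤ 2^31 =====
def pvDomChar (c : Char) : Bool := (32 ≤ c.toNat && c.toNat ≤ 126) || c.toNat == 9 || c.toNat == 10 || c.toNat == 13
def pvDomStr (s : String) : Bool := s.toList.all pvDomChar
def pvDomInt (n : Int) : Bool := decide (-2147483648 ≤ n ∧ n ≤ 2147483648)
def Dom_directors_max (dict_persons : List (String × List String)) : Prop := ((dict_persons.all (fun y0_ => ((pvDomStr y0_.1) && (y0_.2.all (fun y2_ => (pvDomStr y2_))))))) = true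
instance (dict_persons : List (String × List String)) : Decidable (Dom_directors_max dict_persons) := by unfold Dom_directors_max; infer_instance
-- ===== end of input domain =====

-- B folds the dict in ONE pass, keeping the running maximum and the current winner set
-- (reset on a strictly larger count), instead of A's two passes (find max, then re-scan).
-- The returned Python value is a set; both ports build it as a PySem.Set.

-- ===== PORT A =====
-- film + ':' + ' '.join(persons)  (shared by both Pythons verbatim)
def pvKey (p : String × List String) : String := p.1 ++ ":" ++ PySem.Str.join " " p.2

-- A iterates the dict's keys and looks each one up; since a dict's keys are distinct,
-- this is exactly iterating its items (exact under PySem.Dict semantics).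
def directors_max (dict_persons : List (String × List String)) : List String :=
  let items := (PySem.Dict.ofList dict_persons).items
  let max_persons : Nat := items.foldl (fun m p => if p.2.length ≥ m then p.2.length else m) 0
  items.foldl
    (fun s p => if p.2.length = max_persons then PySem.Set.add s (pvKey p) else s)
    PySem.Set.empty

-- ===== PORT B =====
def directors_max_alt (dict_persons : List (String × List String)) : List String :=
  ((PySem.Dict.ofList dict_persons).items.foldl
    (fun (st : Nat × PySem.Set String) p =>
      if p.2.length > st.1 then (p.2.length, PySem.Set.ofList [pvKey p])
      else if p.2.length = st.1 then (st.1, PySem.Set.add st.2 (pvKey p))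
      else st)
    ((0 : Nat), (PySem.Set.empty : PySem.Set String))).2

-- ===== PRECONDITION & SPEC =====
def Spec_directors_max (dict_persons : List (String × List String)) (out : List String) : Prop := out = directors_max_alt dict_persons
instance (dict_persons : List (String × List String)) (out : List String) : Decidable (Spec_directors_max dict_persons out) := by unfold Spec_directors_max; infer_instance

-- ===== CLAIM (what is proved, stated in full; the proofs are below) =====
def Claim_equal_directors_max : Prop := ∀ (dict_persons : List (String × List String)), Dom_directors_max dict_persons → Spec_directors_max dict_persons (directors_max dict_persons)

-- ===== LEMMAS AND PROOFS =====
-- A's two passes, as named functions over an arbitrary pair list.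
def pvMax (L : List (String × List String)) : Nat :=
  L.foldl (fun m p => if p.2.length ≥ m then p.2.length else m) 0

def pvSel (L : List (String × List String)) (M : Nat) : PySem.Set String :=
  L.foldl (fun s p => if p.2.length = M then PySem.Set.add s (pvKey p) else s) PySem.Set.empty

lemma le_foldl_maxstep (L : List (String × List String)) :
    ∀ m : Nat, m ≤ L.foldl (fun m p => if p.2.length ≥ m then p.2.length else m) m := by
  induction L with
  | nil => intro m; simp
  | cons a L ih =>
    intro m
    simp only [List.foldl_cons]
    exact le_trans (by split <;> omega) (ih _)

lemma mem_le_pvMax (L : List (String × List String)) :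
    ∀ (m : Nat) (q : String × List String), q ∈ L →
      q.2.length ≤ L.foldl (fun m p => if p.2.length ≥ m then p.2.length else m) m := by
  induction L with
  | nil => intro m q h; cases h
  | cons a L ih =>
    intro m q h
    simp only [List.foldl_cons]
    rcases List.mem_cons.mp h with rfl | h
    · exact le_trans (by split <;> omega) (le_foldl_maxstep L _)
    · exact ih _ q h

lemma pvSel_empty_of_ne (M : Nat) (L : List (String × List String))
    (h : ∀ q ∈ L, q.2.length ≠ M) : pvSel L M = PySem.Set.empty := by
  induction L with
  | nil => rfl
  | cons a L ih =>
    have ha : a.2.length ≠ M := h a (by simp)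
    have := ih (fun q hq => h q (by simp [hq]))
    simpa [pvSel, List.foldl_cons, ha] using this

lemma pvMax_append (L : List (String × List String)) (p : String × List String) :
    pvMax (L ++ [p]) = if p.2.length ≥ pvMax L then p.2.length else pvMax L := by
  simp [pvMax, List.foldl_append]

lemma pvSel_append (L : List (String × List String)) (p : String × List String) (M : Nat) :
    pvSel (L ++ [p]) M =
      if p.2.length = M then PySem.Set.add (pvSel L M) (pvKey p) else pvSel L M := by
  simp [pvSel, List.foldl_append]

lemma add_empty (x : String) :
    PySem.Set.add PySem.Set.empty x = PySem.Set.ofList [x] := rfl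

lemma loopB_eq (L : List (String × List String)) :
    L.foldl
      (fun (st : Nat × PySem.Set String) p =>
        if p.2.length > st.1 then (p.2.length, PySem.Set.ofList [pvKey p])
        else if p.2.length = st.1 then (st.1, PySem.Set.add st.2 (pvKey p))
        else st)
      ((0 : Nat), (PySem.Set.empty : PySem.Set String))
    = (pvMax L, pvSel L (pvMax L)) := by
  induction L using List.reverseRecOn with
  | nil => rfl
  | append_singleton L p ih =>
    rw [List.foldl_append, ih]
    simp only [List.foldl_cons, List.foldl_nil]
    by_cases h1 : p.2.length > pvMax L
    · have hmax : pvMax (L ++ [p]) = p.2.length := by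
        rw [pvMax_append]; simp [Nat.le_of_lt h1]
      have hsel : pvSel L p.2.length = PySem.Set.empty := by
        apply pvSel_empty_of_ne
        intro q hq
        have := mem_le_pvMax L 0 q hq
        change q.2.length ≤ pvMax L at this
        omega
      rw [if_pos h1, Prod.ext_iff]
      constructor
      · exact hmax.symm
      · rw [hmax, pvSel_append, if_pos rfl, hsel, add_empty]
    · by_cases h2 : p.2.length = pvMax L
      · have hmax : pvMax (L ++ [p]) = pvMax L := by
          rw [pvMax_append]; split <;> omega
        rw [if_neg h1, if_pos h2, Prod.ext_iff]
        refine ⟨hmax.symm, ?_⟩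
        rw [hmax, pvSel_append, if_pos h2]
      · have hmax : pvMax (L ++ [p]) = pvMax L := by
          rw [pvMax_append]; rw [if_neg (by omega)]
        rw [if_neg h1, if_neg h2, Prod.ext_iff]
        refine ⟨hmax.symm, ?_⟩
        rw [hmax, pvSel_append, if_neg h2]

-- ===== VERDICT (by name: the statement is the Claim_ definition above) =====
theorem directors_max_spec : Claim_equal_directors_max := by
  intro dp _
  show directors_max dp = directors_max_alt dp
  rw [directors_max_alt, loopB_eq]
  rfl
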